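-- pv_equiv track=rewrite | github.com/Gaurav-Codetek/poc_lineage_backend | app/utils/lineage_retriever.py | filter_redundant_chains
-- ===== SOURCE A (Python) =====
-- def filter_redundant_chains(chains):
--     filtered = []
--
--     for chain in chains:
--         is_subset = False
--
--         for other in chains:
--             if chain == other:
--                 continue
--
--             if len(chain) < len(other) and all(x in other for x in chain):
--                 is_subset = True
--                 break
--
--         if not is_subset:
--             filtered.append(chain)
--
--     return filtered
-- ===== SOURCE B (Python) =====
-- def filter_redundant_chains(chains):
--     # Process chains longest-first; a chain is redundant iff some strictly
--     # longer already-kept chain contains all of its elements.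
--     kept = []
--     redundant = set()
--     for i, c in sorted(enumerate(chains), key=lambda p: -len(p[1])):
--         if any(len(k) > len(c) and all(x in k for x in c) for k in kept):
--             redundant.add(i)
--         else:
--             kept.append(c)
--     return [c for i, c in enumerate(chains) if i not in redundant]
-- ===== Notes on version B (the rewrite author's own statement) =====
-- stated objective: alternative
-- what changed: Instead of testing every chain against every other chain, B sorts the chains longest-first (with original indices), keeps a running list of non-redundant chains, tests each chain only against the strictly longer kept ones, and finally filters the original list by the collected redundant-index set.
import Mathlib
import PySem

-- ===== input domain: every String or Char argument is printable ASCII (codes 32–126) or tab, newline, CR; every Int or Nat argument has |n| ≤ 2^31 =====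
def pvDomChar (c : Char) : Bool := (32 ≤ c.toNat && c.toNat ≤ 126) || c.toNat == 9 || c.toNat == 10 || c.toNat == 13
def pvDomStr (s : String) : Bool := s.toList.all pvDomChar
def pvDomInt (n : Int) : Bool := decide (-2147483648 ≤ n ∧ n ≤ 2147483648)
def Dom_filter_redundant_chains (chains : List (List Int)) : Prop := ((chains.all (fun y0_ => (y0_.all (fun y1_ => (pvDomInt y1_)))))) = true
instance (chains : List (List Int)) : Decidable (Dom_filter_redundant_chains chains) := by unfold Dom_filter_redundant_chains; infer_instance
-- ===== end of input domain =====

-- B processes the chains longest-first, keeping only non-redundant chains and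
-- testing each chain against the kept list instead of rescanning all chains
-- (alternative decomposition; same observable result, order preserved).

-- ===== PORT A =====
-- inner 'for other in chains' loop with break
def pvInnerA (chain : List Int) : List (List Int) → Bool
  | [] => false
  | o :: rest =>
    if chain = o then pvInnerA chain rest
    else if decide (chain.length < o.length) && chain.all (fun x => o.contains x) then true
    else pvInnerA chain rest

def filter_redundant_chains (chains : List (List Int)) : List (List Int) :=
  chains.foldl (fun filtered chain =>
    if pvInnerA chain chains then filtered else filtered ++ [chain]) []

-- ===== PORT B =====
-- all(x in k for x in c)
def pvSub (c k : List Int) : Bool := c.all (fun x => k.contains x)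

-- any(len(k) > len(c) and all(x in k for x in c) for k in kept)
def pvTest (c : List Int) (kept : List (List Int)) : Bool :=
  kept.any (fun k => decide (c.length < k.length) && pvSub c k)

-- the 'for i, c in sorted(...)' loop, returning the set of redundant indices
def pvLoopB : List (Int × List Int) → List (List Int) → PySem.Set Int → PySem.Set Int
  | [], _, red => red
  | (i, c) :: rest, kept, red =>
    if pvTest c kept then pvLoopB rest kept (PySem.Set.add red i)
    else pvLoopB rest (kept ++ [c]) red

def filter_redundant_chains_alt (chains : List (List Int)) : List (List Int) :=
  let red := pvLoopB
    (PySem.List.sorted (PySem.List.enumerate chains) (fun p => -(p.2.length : Int)))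
    [] PySem.Set.empty
  ((PySem.List.enumerate chains).filter (fun p => !(PySem.Set.contains red p.1))).map
    (fun p => p.2)

-- ===== PRECONDITION & SPEC =====
def Spec_filter_redundant_chains (chains : List (List Int)) (out : List (List Int)) : Prop := out = filter_redundant_chains_alt chains
instance (chains : List (List Int)) (out : List (List Int)) : Decidable (Spec_filter_redundant_chains chains out) := by unfold Spec_filter_redundant_chains; infer_instance

-- ===== CLAIM (what is proved, stated in full; the proofs are below) =====
def Claim_equal_filter_redundant_chains : Prop := ∀ (chains : List (List Int)), Dom_filter_redundant_chains chains → Spec_filter_redundant_chains chains (filter_redundant_chains chains)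

-- ===== LEMMAS AND PROOFS =====

-- 'chain is a strict subset of some chain of the list' (the property both programs decide)
def pvRed (chains : List (List Int)) (c : List Int) : Bool :=
  chains.any (fun o => decide (c.length < o.length) && pvSub c o)

theorem pvInnerA_eq (c : List Int) (l : List (List Int)) :
    pvInnerA c l = l.any (fun o => decide (c.length < o.length) && pvSub c o) := by
  induction l with
  | nil => rfl
  | cons o rest ih =>
    by_cases h : c = o
    · subst h
      simp [pvInnerA, ih]
    · rw [List.any_cons, ← ih]
      conv_lhs => rw [pvInnerA.eq_2]
      rw [if_neg h, pvSub]
      cases hb : (decide (c.length < o.length) && c.all (fun x => o.contains x)) <;> simp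

theorem foldl_skip_if (p : List Int → Bool) (l : List (List Int)) (acc : List (List Int)) :
    l.foldl (fun a x => if p x then a else a ++ [x]) acc = acc ++ l.filter (fun x => !p x) := by
  induction l generalizing acc with
  | nil => simp
  | cons x xs ih =>
    rw [List.foldl_cons, List.filter_cons]
    cases hp : p x <;> simp [ih]

theorem pvSub_trans {a b c : List Int} (h1 : pvSub a b = true) (h2 : pvSub b c = true) :
    pvSub a c = true := by
  simp only [pvSub, List.all_eq_true] at *
  intro x hx
  have h1' := h1 x hx
  simp only [List.contains_eq_mem, decide_eq_true_eq] at *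
  exact h2 _ h1' 

theorem exists_nonredundant_superset (chains : List (List Int)) (d : Nat) :
    ∀ (c : List Int), (∀ o ∈ chains, o.length ≤ c.length + d) → pvRed chains c = true →
    ∃ m ∈ chains, c.length < m.length ∧ pvSub c m = true ∧ pvRed chains m = false := by
  induction d with
  | zero =>
    intro c hb hred
    rw [pvRed, List.any_eq_true] at hred
    obtain ⟨o, ho, hcond⟩ := hred
    rw [Bool.and_eq_true, decide_eq_true_eq] at hcond
    have := hb o ho
    omega
  | succ d ih =>
    intro c hb hred
    rw [pvRed, List.any_eq_true] at hred
    obtain ⟨o, ho, hcond⟩ := hred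
    rw [Bool.and_eq_true, decide_eq_true_eq] at hcond
    by_cases hro : pvRed chains o = true
    · have hb' : ∀ o' ∈ chains, o'.length ≤ o.length + d := by
        intro o' ho'
        have := hb o' ho'
        omega
      obtain ⟨m, hm, hlen, hsub, hnr⟩ := ih o hb' hro
      exact ⟨m, hm, by omega, pvSub_trans hcond.2 hsub, hnr⟩
    · exact ⟨o, ho, hcond.1, hcond.2, by simpa using hro⟩

theorem exists_nonredundant_superset' (chains : List (List Int)) (c : List Int)
    (h : pvRed chains c = true) :
    ∃ m ∈ chains, c.length < m.length ∧ pvSub c m = true ∧ pvRed chains m = false := by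
  refine exists_nonredundant_superset chains ((chains.map List.length).sum) c (fun o ho => ?_) h
  have : o.length ≤ (chains.map List.length).sum :=
    List.single_le_sum (fun x _ => Nat.zero_le x) _ (List.mem_map_of_mem ho)
  omega

theorem loopB_mem (chains : List (List Int)) :
    ∀ (l : List (Int × List Int)) (kept : List (List Int)) (red : PySem.Set Int),
    l.Pairwise (fun p q => q.2.length ≤ p.2.length) →
    (∀ p ∈ l, p.2 ∈ chains) →
    (∀ k ∈ kept, k ∈ chains ∧ pvRed chains k = false) →
    (∀ o ∈ chains, pvRed chains o = false → o ∈ kept ∨ ∃ p ∈ l, p.2 = o) →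
    ∀ j, (j ∈ pvLoopB l kept red ↔ j ∈ red ∨ ∃ p ∈ l, p.1 = j ∧ pvRed chains p.2 = true) := by
  intro l
  induction l with
  | nil => intro kept red _ _ _ _ j; simp [pvLoopB]
  | cons hd t ih =>
    obtain ⟨i, c⟩ := hd
    intro kept red hsort hmem hkept hcover j
    have hsort' := List.pairwise_cons.mp hsort
    have hc_mem : c ∈ chains := hmem (i, c) List.mem_cons_self
    have hmem_t : ∀ p ∈ t, p.2 ∈ chains := fun p hp => hmem p (List.mem_cons_of_mem _ hp)
    have htest : pvTest c kept = pvRed chains c := by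
      by_cases hr : pvRed chains c = true
      · rw [hr]
        obtain ⟨m, hm, hlen, hsub, hnr⟩ := exists_nonredundant_superset' chains c hr
        have hmk : m ∈ kept := by
          rcases hcover m hm hnr with h | ⟨p, hp, hpe⟩
          · exact h
          · rcases List.mem_cons.mp hp with h | h
            · rw [h] at hpe
              simp only at hpe
              rw [hpe] at hlen
              omega
            · have hle := hsort'.1 p h
              simp only at hle
              rw [hpe] at hle
              omega
        rw [pvTest, List.any_eq_true]
        refine ⟨m, hmk, ?_⟩
        rw [Bool.and_eq_true, decide_eq_true_eq]
        exact ⟨hlen, hsub⟩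
      · cases hk : pvTest c kept
        · simpa using (Bool.not_eq_true _).mp hr
        · exfalso
          rw [pvTest, List.any_eq_true] at hk
          obtain ⟨k, hkm, hcond⟩ := hk
          apply hr
          rw [pvRed, List.any_eq_true]
          exact ⟨k, (hkept k hkm).1, hcond⟩
    by_cases hr : pvRed chains c = true
    · have ht : pvTest c kept = true := by rw [htest, hr]
      have hcover_t : ∀ o ∈ chains, pvRed chains o = false → o ∈ kept ∨ ∃ p ∈ t, p.2 = o := by
        intro o ho hno
        rcases hcover o ho hno with h | ⟨p, hp, he⟩
        · exact Or.inl h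
        · rcases List.mem_cons.mp hp with h | h
          · rw [h] at he
            simp only at he
            rw [he] at hr
            rw [hr] at hno
            exact absurd hno (by simp)
          · exact Or.inr ⟨p, h, he⟩
      simp only [pvLoopB, ht, if_true]
      rw [ih kept (PySem.Set.add red i) hsort'.2 hmem_t hkept hcover_t j]
      simp only [PySem.Set.mem_add, List.exists_mem_cons_iff, hr, and_true, eq_comm]
      tauto
    · have hrf : pvRed chains c = false := (Bool.not_eq_true _).mp hr
      have ht : pvTest c kept = false := by rw [htest, hrf]
      have hkept' : ∀ k ∈ kept ++ [c], k ∈ chains ∧ pvRed chains k = false := by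
        intro k hk
        rcases List.mem_append.mp hk with h | h
        · exact hkept k h
        · rw [List.mem_singleton.mp h]
          exact ⟨hc_mem, hrf⟩
      have hcover' : ∀ o ∈ chains, pvRed chains o = false → o ∈ kept ++ [c] ∨ ∃ p ∈ t, p.2 = o := by
        intro o ho hno
        rcases hcover o ho hno with h | ⟨p, hp, he⟩
        · exact Or.inl (List.mem_append.mpr (Or.inl h))
        · rcases List.mem_cons.mp hp with h | h
          · rw [h] at he
            simp only at he
            exact Or.inl (List.mem_append.mpr (Or.inr (by rw [he]; exact List.mem_singleton.mpr rfl)))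
          · exact Or.inr ⟨p, h, he⟩
      simp only [pvLoopB, ht, if_false, Bool.false_eq_true]
      rw [ih (kept ++ [c]) red hsort'.2 hmem_t hkept' hcover' j]
      simp [hrf]

theorem enum_filter_map (pred : List Int → Bool) (xs : List (List Int)) (s : Int) :
    ((PySem.List.enumerate xs s).filter (fun p => pred p.2)).map (fun p => p.2)
      = xs.filter pred := by
  induction xs generalizing s with
  | nil => simp [PySem.List.enumerate_nil]
  | cons x xs ih =>
    rw [PySem.List.enumerate_cons, List.filter_cons, List.filter_cons]
    cases hp : pred x <;> simp [ih]

-- ===== VERDICT (by name: the statement is the Claim_ definition above) =====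
theorem filter_redundant_chains_spec : Claim_equal_filter_redundant_chains := by
  intro chains _
  unfold Spec_filter_redundant_chains
  rw [filter_redundant_chains, foldl_skip_if]
  rw [List.nil_append]
  have hA : chains.filter (fun c => !pvInnerA c chains)
      = chains.filter (fun c => !pvRed chains c) := by
    apply List.filter_congr
    intro x _
    rw [pvInnerA_eq, pvRed]
  rw [hA]
  show chains.filter (fun c => !pvRed chains c)
      = ((PySem.List.enumerate chains).filter
          (fun p => !(PySem.Set.contains (pvLoopB
            (PySem.List.sorted (PySem.List.enumerate chains) (fun p => -(p.2.length : Int)))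
            [] PySem.Set.empty) p.1))).map (fun p => p.2)
  have hpw : (PySem.List.sorted (PySem.List.enumerate chains)
      (fun p => -(p.2.length : Int))).Pairwise (fun p q => q.2.length ≤ p.2.length) := by
    have h := PySem.List.sorted_pairwise (xs := PySem.List.enumerate chains)
      (key := fun p => -(p.2.length : Int))
    refine h.imp ?_
    intro a b hab
    simp only at hab
    omega
  have hmem : ∀ p ∈ PySem.List.sorted (PySem.List.enumerate chains)
      (fun p => -(p.2.length : Int)), p.2 ∈ chains := by
    intro p hp
    rw [PySem.List.mem_sorted, PySem.List.mem_enumerate_iff] at hp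
    obtain ⟨k, hk, rfl⟩ := hp
    exact List.getElem_mem hk
  have hcover : ∀ o ∈ chains, pvRed chains o = false →
      o ∈ ([] : List (List Int)) ∨ ∃ p ∈ PySem.List.sorted (PySem.List.enumerate chains)
        (fun p => -(p.2.length : Int)), p.2 = o := by
    intro o ho _
    right
    obtain ⟨k, hk, he⟩ := List.mem_iff_getElem.mp ho
    refine ⟨((0 : Int) + k, chains[k]), ?_, he⟩
    rw [PySem.List.mem_sorted, PySem.List.mem_enumerate_iff]
    exact ⟨k, hk, rfl⟩
  have hmemR := loopB_mem chains
    (PySem.List.sorted (PySem.List.enumerate chains) (fun p => -(p.2.length : Int)))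
    [] PySem.Set.empty hpw hmem (fun k hk => absurd hk (List.not_mem_nil)) hcover
  have hcontains : ∀ p ∈ PySem.List.enumerate chains,
      (!(PySem.Set.contains (pvLoopB
        (PySem.List.sorted (PySem.List.enumerate chains) (fun p => -(p.2.length : Int)))
        [] PySem.Set.empty) p.1)) = !pvRed chains p.2 := by
    intro p hp
    rw [PySem.List.mem_enumerate_iff] at hp
    obtain ⟨k, hk, rfl⟩ := hp
    simp only
    congr 1
    have hiff := hmemR ((0 : Int) + k)
    by_cases hr : pvRed chains chains[k] = true
    · have hin : ((0 : Int) + k) ∈ pvLoopB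
          (PySem.List.sorted (PySem.List.enumerate chains) (fun p => -(p.2.length : Int)))
          [] PySem.Set.empty := by
        rw [hiff]
        refine Or.inr ⟨((0 : Int) + k, chains[k]), ?_, rfl, hr⟩
        rw [PySem.List.mem_sorted, PySem.List.mem_enumerate_iff]
        exact ⟨k, hk, rfl⟩
      rw [hr]
      simpa [PySem.Set.contains] using hin
    · have hnin : ((0 : Int) + k) ∉ pvLoopB
          (PySem.List.sorted (PySem.List.enumerate chains) (fun p => -(p.2.length : Int)))
          [] PySem.Set.empty := by
        rw [hiff]
        rintro (h | ⟨q, hq, hq1, hq2⟩)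
        · simp [PySem.Set.empty] at h
        · rw [PySem.List.mem_sorted, PySem.List.mem_enumerate_iff] at hq
          obtain ⟨k', hk', rfl⟩ := hq
          simp only at hq1 hq2
          have : k' = k := by omega
          subst this
          exact hr hq2
      rw [(Bool.not_eq_true _).mp hr]
      simpa [PySem.Set.contains] using hnin
  rw [List.filter_congr hcontains]
  exact (enum_filter_map (fun c => !pvRed chains c) chains 0).symm
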